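-- pv_equiv track=rewrite | github.com/LloydBurris985/Project_Odin | bns.py | generate_mask_list
-- ===== SOURCE A (Python) =====
-- def generate_mask_list(vl, vr, m, base, length, direction):
--     masks = []
--     current_vl = vl
--     current_vr = vr
--     step = 1 if direction == '+' else -1
--     for _ in range(length):
--         masks.append(current_vr % 256)
--         current_vl += step
--         current_vr += step * base
--         if (current_vl - current_vr) >= m or (current_vl - current_vr) <= -m:
--             current_vl += step * m
--     return masks
-- ===== SOURCE B (Python) =====
-- def generate_mask_list(vl, vr, m, base, length, direction):
--     step = 1 if direction == '+' else -1
--     return [(vr + step * base * i) % 256 for i in range(length)]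
-- ===== Notes on version B (the rewrite author's own statement) =====
-- stated objective: simpler
-- what changed: Replaces the stateful accumulator loop (running current_vl/current_vr and a dead conditional) by a stateless closed-form per-index formula (vr + step*base*i) % 256.
import Mathlib
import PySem

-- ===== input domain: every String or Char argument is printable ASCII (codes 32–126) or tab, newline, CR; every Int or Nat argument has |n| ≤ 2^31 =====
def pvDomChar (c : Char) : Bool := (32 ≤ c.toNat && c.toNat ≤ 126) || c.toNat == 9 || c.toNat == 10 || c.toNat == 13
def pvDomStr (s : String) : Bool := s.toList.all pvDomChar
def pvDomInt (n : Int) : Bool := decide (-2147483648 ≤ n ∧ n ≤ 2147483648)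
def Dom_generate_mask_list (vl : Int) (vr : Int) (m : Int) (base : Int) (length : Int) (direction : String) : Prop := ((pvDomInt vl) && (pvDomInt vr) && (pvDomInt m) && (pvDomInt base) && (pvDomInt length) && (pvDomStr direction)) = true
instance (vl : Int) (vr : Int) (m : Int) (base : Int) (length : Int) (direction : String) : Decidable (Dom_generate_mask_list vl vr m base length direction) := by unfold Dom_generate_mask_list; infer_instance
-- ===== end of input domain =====

-- ===== PORT A =====
-- Literal transliteration of A: a foldl over range(length) carrying (current_vl, current_vr, masks).
def generate_mask_list (vl : Int) (vr : Int) (m : Int) (base : Int) (length : Int) (direction : String) : List Int :=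
  let step : Int := if direction = "+" then 1 else -1
  ((PySem.List.pyRange 0 length 1).foldl
    (fun (st : Int × Int × List Int) _ =>
      let masks := st.2.2 ++ [PySem.Int.mod st.2.1 256]
      let cvl := st.1 + step
      let cvr := st.2.1 + step * base
      (if cvl - cvr ≥ m ∨ cvl - cvr ≤ -m then cvl + step * m else cvl, cvr, masks))
    (vl, vr, ([] : List Int))).2.2

-- ===== PORT B =====
-- B changes A's stateful accumulator loop into a stateless closed-form map over the index range (objective: simpler).
def generate_mask_list_alt (vl : Int) (vr : Int) (m : Int) (base : Int) (length : Int) (direction : String) : List Int :=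
  let step : Int := if direction = "+" then 1 else -1
  (PySem.List.pyRange 0 length 1).map (fun i => PySem.Int.mod (vr + step * base * i) 256)

-- ===== PRECONDITION & SPEC =====
def Spec_generate_mask_list (vl : Int) (vr : Int) (m : Int) (base : Int) (length : Int) (direction : String) (out : List Int) : Prop := out = generate_mask_list_alt vl vr m base length direction
instance (vl : Int) (vr : Int) (m : Int) (base : Int) (length : Int) (direction : String) (out : List Int) : Decidable (Spec_generate_mask_list vl vr m base length direction out) := by unfold Spec_generate_mask_list; infer_instance

-- ===== CLAIM =====
def Claim_equal_generate_mask_list : Prop := ∀ (vl : Int) (vr : Int) (m : Int) (base : Int) (length : Int) (direction : String), Dom_generate_mask_list vl vr m base length direction → Spec_generate_mask_list vl vr m base length direction (generate_mask_list vl vr m base length direction)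

-- ===== LEMMAS AND PROOFS =====

-- The emitted masks of A's loop depend only on the length of the iterated list and the running current_vr.
theorem foldA_masks (step base m : Int) :
    ∀ (l : List Int) (cvl cvr : Int) (acc : List Int),
      (l.foldl
        (fun (st : Int × Int × List Int) _ =>
          let masks := st.2.2 ++ [PySem.Int.mod st.2.1 256]
          let cvl := st.1 + step
          let cvr := st.2.1 + step * base
          (if cvl - cvr ≥ m ∨ cvl - cvr ≤ -m then cvl + step * m else cvl, cvr, masks))
        (cvl, cvr, acc)).2.2
      = acc ++ (List.range l.length).map (fun k : Nat => PySem.Int.mod (cvr + step * base * (k : Int)) 256) := by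
  intro l
  induction l with
  | nil => intro cvl cvr acc; simp
  | cons x t ih =>
    intro cvl cvr acc
    simp only [List.foldl_cons, List.length_cons]
    rw [ih]
    rw [List.range_succ_eq_map, List.map_cons, List.map_map, List.append_assoc,
      List.singleton_append]
    congr 2
    · norm_num
    · congr 1
      funext k
      simp only [Function.comp_apply, Nat.succ_eq_add_one]
      congr 1
      push_cast
      ring

-- ===== VERDICT =====
theorem generate_mask_list_spec : Claim_equal_generate_mask_list := by
  intro vl vr m base length direction _
  unfold Spec_generate_mask_list generate_mask_list generate_mask_list_alt
  rw [foldA_masks]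
  simp [PySem.List.pyRange_one, List.map_map, Function.comp]
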